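-- pv_equiv track=rewrite | github.com/tr00x/SOMA-Core | tools/replay_traces.py | _looks_like_error
-- ===== SOURCE A (Python) =====
-- def _looks_like_error(output: str) -> bool:
--     """Heuristic error detection in tool output. Mirrors the live
--     hook's strategy 2 (scan response text) since the dataset doesn't
--     expose a structured per-call error flag.
--     """
--     if not output:
--         return False
--     lower = output.lower()
--     error_markers = (
--         "traceback (most recent call last)",
--         "command not found",
--         "permission denied",
--         "no such file or directory",
--         "syntaxerror",
--         "modulenotfounderror",
--         "importerror",
--         "filenotfounderror",
--         "exit code: 1",
--         "error: ",
--         "fatal: ",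
--     )
--     return any(m in lower for m in error_markers)
-- ===== SOURCE B (Python) =====
-- _ERROR_MARKERS = (
--     "traceback (most recent call last)",
--     "command not found",
--     "permission denied",
--     "no such file or directory",
--     "syntaxerror",
--     "modulenotfounderror",
--     "importerror",
--     "filenotfounderror",
--     "exit code: 1",
--     "error: ",
--     "fatal: ",
-- )
--
-- # First-character index: at each text position only markers that can start there are tried.
-- _BUCKETS = {}
-- for _m in _ERROR_MARKERS:
--     _BUCKETS.setdefault(_m[0], []).append(_m)
--
--
-- def _looks_like_error(output: str) -> bool:
--     lower = output.lower()
--     for i, c in enumerate(lower):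
--         for m in _BUCKETS.get(c, ()):
--             if lower.startswith(m, i):
--                 return True
--     return False
-- ===== Notes on version B (the rewrite author's own statement) =====
-- stated objective: alternative
-- what changed: Replaces A's marker-major loop (one full substring scan of the text per marker) by a single position-major pass over the lowered text that, at each position, tries only the markers selected by a precomputed first-character bucket index via startswith.
import Mathlib
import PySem

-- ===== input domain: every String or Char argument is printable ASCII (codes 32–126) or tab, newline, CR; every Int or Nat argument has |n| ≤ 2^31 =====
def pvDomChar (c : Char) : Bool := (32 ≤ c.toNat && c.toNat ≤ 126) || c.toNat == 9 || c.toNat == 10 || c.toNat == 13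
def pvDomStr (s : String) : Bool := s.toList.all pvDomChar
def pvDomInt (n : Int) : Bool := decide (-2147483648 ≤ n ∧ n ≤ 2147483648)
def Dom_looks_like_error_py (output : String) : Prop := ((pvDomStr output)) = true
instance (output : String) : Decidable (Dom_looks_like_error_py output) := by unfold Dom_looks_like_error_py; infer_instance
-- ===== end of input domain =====

-- B replaces A's per-marker whole-string scans by one position-major pass with a
-- first-character bucket index (objective: alternative traversal, same result).

-- the marker tuple shared verbatim by both Pythons
def pvErrorMarkers : List (List Char) :=
  [ "traceback (most recent call last)".toList
  , "command not found".toList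
  , "permission denied".toList
  , "no such file or directory".toList
  , "syntaxerror".toList
  , "modulenotfounderror".toList
  , "importerror".toList
  , "filenotfounderror".toList
  , "exit code: 1".toList
  , "error: ".toList
  , "fatal: ".toList ]

-- ===== PORT A =====
def looks_like_error_py (output : String) : Bool :=
  if output.toList = [] then false
  else
    let lower := PySem.Chars.lower output.toList
    pvErrorMarkers.any (fun m => PySem.Chars.isIn m lower)

-- ===== PORT B =====
-- _BUCKETS.get(c, ()): the markers whose first character is c, in tuple order
def pvBucket (c : Char) : List (List Char) :=
  pvErrorMarkers.filter (fun m => m.head? == some c)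

-- the 'for i, c in enumerate(lower)' loop, as recursion over the suffixes of lower
def pvScan : List Char → Bool
  | [] => false
  | c :: rest =>
      (pvBucket c).any (fun m => PySem.Chars.startswith (c :: rest) m) || pvScan rest

def looks_like_error_py_alt (output : String) : Bool :=
  pvScan (PySem.Chars.lower output.toList)

-- ===== PRECONDITION & SPEC =====
def Spec_looks_like_error_py (output : String) (out : Bool) : Prop := out = looks_like_error_py_alt output
instance (output : String) (out : Bool) : Decidable (Spec_looks_like_error_py output out) := by unfold Spec_looks_like_error_py; infer_instance

-- ===== CLAIM (what is proved, stated in full; the proofs are below) =====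
def Claim_equal_looks_like_error_py : Prop := ∀ (output : String), Dom_looks_like_error_py output → Spec_looks_like_error_py output (looks_like_error_py output)

-- ===== LEMMAS AND PROOFS =====

theorem pvErrorMarkers_ne_nil : ∀ m ∈ pvErrorMarkers, m ≠ [] := by decide

theorem head?_of_prefix_cons {m : List Char} {c : Char} {rest : List Char}
    (hm : m ≠ []) (h : m <+: c :: rest) : m.head? = some c := by
  cases m with
  | nil => exact absurd rfl hm
  | cons a t => rw [List.cons_prefix_cons] at h; simp [h.1]

theorem pvScan_eq_any (cs : List Char) :
    pvScan cs = pvErrorMarkers.any (fun m => PySem.Chars.isIn m cs) := by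
  induction cs with
  | nil => decide
  | cons c rest ih =>
    rw [pvScan, ih]
    rw [Bool.eq_iff_iff]
    simp only [Bool.or_eq_true, List.any_eq_true, pvBucket, List.mem_filter,
      beq_iff_eq, PySem.Chars.startswith_iff, PySem.Chars.isIn_iff_infix,
      List.infix_cons_iff]
    constructor
    · rintro (⟨m, ⟨hm, _⟩, hp⟩ | ⟨m, hm, hi⟩)
      · exact ⟨m, hm, Or.inl hp⟩
      · exact ⟨m, hm, Or.inr hi⟩
    · rintro ⟨m, hm, hp | hi⟩
      · exact Or.inl ⟨m, ⟨hm, head?_of_prefix_cons (pvErrorMarkers_ne_nil m hm) hp⟩, hp⟩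
      · exact Or.inr ⟨m, hm, hi⟩

-- ===== VERDICT (by name: the statement is the Claim_ definition above) =====
theorem looks_like_error_py_spec : Claim_equal_looks_like_error_py := by
  intro output _
  unfold Spec_looks_like_error_py looks_like_error_py looks_like_error_py_alt
  rw [pvScan_eq_any]
  by_cases h : output.toList = []
  · simp [h, PySem.Chars.lower]; decide
  · simp [h]
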